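-- pv_equiv track=rewrite | github.com/abhishek5878/jarvis | classifier.py | enhance_tags
-- ===== SOURCE A (Python) =====
-- from typing import List, Set
--
-- def enhance_tags(tags: List[str]) -> List[str]:
--     """Add meta-tags based on existing tags"""
--     enhanced = set(tags)
--
--     # Add meta-category tags
--     if any(tag in ['startups', 'marketing', 'tech'] for tag in tags):
--         enhanced.add('business')
--
--     if any(tag in ['productivity', 'learning', 'mental_models'] for tag in tags):
--         enhanced.add('self_improvement')
--
--     if any(tag in ['philosophy', 'psychology', 'creativity'] for tag in tags):
--         enhanced.add('mindset')
--
--     return list(enhanced)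
-- ===== SOURCE B (Python) =====
-- META = {
--     'startups': 'business', 'marketing': 'business', 'tech': 'business',
--     'productivity': 'self_improvement', 'learning': 'self_improvement',
--     'mental_models': 'self_improvement',
--     'philosophy': 'mindset', 'psychology': 'mindset',
--     'creativity': 'mindset',
-- }
--
-- def enhance_tags(tags):
--     """Add meta-tags based on existing tags (single table-driven pass)."""
--     metas = {META[t] for t in tags if t in META}
--     enhanced = set(tags)
--     for m in ('business', 'self_improvement', 'mindset'):
--         if m in metas:
--             enhanced.add(m)
--     return list(enhanced)
-- ===== Notes on version B (the rewrite author's own statement) =====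
-- stated objective: idiomatic
-- what changed: Replaces A's three separate any()-scans over the tags (one per meta-category) with a single lookup-table pass that collects the triggered meta-categories via a dict, then emits them in canonical order.
import Mathlib
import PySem

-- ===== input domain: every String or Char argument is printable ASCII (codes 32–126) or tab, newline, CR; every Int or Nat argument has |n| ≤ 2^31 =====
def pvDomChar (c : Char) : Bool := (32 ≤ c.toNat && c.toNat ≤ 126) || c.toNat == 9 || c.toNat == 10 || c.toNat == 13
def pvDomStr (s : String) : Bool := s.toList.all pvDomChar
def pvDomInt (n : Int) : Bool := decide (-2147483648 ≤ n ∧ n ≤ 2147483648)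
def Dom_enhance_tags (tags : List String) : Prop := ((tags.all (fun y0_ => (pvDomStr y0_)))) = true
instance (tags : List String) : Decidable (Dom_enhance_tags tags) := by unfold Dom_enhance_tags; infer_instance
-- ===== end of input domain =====

-- B replaces A's three separate any()-scans over the tags by one lookup-table pass (idiomatic; same return value).
-- The return value is list(set(...)): both ports realise the set in first-insertion order; outputs are compared as sets.

-- ===== PORT A =====
def enhance_tags (tags : List String) : List String :=
  let enhanced : PySem.Set String := PySem.Set.ofList tags
  let enhanced :=
    if tags.any (fun tag => decide (tag ∈ (["startups", "marketing", "tech"] : List String))) then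
      PySem.Set.add enhanced "business"
    else enhanced
  let enhanced :=
    if tags.any (fun tag => decide (tag ∈ (["productivity", "learning", "mental_models"] : List String))) then
      PySem.Set.add enhanced "self_improvement"
    else enhanced
  let enhanced :=
    if tags.any (fun tag => decide (tag ∈ (["philosophy", "psychology", "creativity"] : List String))) then
      PySem.Set.add enhanced "mindset"
    else enhanced
  enhanced

-- ===== PORT B =====
def pvMETA : PySem.Dict String String :=
  PySem.Dict.ofList
    [("startups", "business"), ("marketing", "business"), ("tech", "business"),
     ("productivity", "self_improvement"), ("learning", "self_improvement"),
     ("mental_models", "self_improvement"),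
     ("philosophy", "mindset"), ("psychology", "mindset"), ("creativity", "mindset")]

def enhance_tags_alt (tags : List String) : List String :=
  -- metas = {META[t] for t in tags if t in META}
  let metas : PySem.Set String :=
    tags.foldl (fun s t =>
      match PySem.Dict.get? pvMETA t with
      | some m => PySem.Set.add s m
      | none => s) PySem.Set.empty
  let enhanced : PySem.Set String := PySem.Set.ofList tags
  -- for m in ('business', 'self_improvement', 'mindset'): if m in metas: enhanced.add(m)
  (["business", "self_improvement", "mindset"] : List String).foldl
    (fun e m => if PySem.Set.contains metas m then PySem.Set.add e m else e) enhanced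

-- ===== PRECONDITION & SPEC =====
def Spec_enhance_tags (tags : List String) (out : List String) : Prop := out = enhance_tags_alt tags
instance (tags : List String) (out : List String) : Decidable (Spec_enhance_tags tags out) := by unfold Spec_enhance_tags; infer_instance

-- ===== CLAIM (what is proved, stated in full; the proofs are below) =====
def Claim_equal_enhance_tags : Prop := ∀ (tags : List String), Dom_enhance_tags tags → Spec_enhance_tags tags (enhance_tags tags)

-- ===== LEMMAS AND PROOFS =====

theorem pvMETA_mk :
    pvMETA = PySem.Dict.mk
      [("startups", "business"), ("marketing", "business"), ("tech", "business"),
       ("productivity", "self_improvement"), ("learning", "self_improvement"),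
       ("mental_models", "self_improvement"),
       ("philosophy", "mindset"), ("psychology", "mindset"), ("creativity", "mindset")] := by
  decide

-- membership in B's collected metas set, characterised by the mapping
theorem mem_metas_foldl (tags : List String) (s : PySem.Set String) (m : String) :
    (m ∈ tags.foldl (fun s t =>
      match PySem.Dict.get? pvMETA t with
      | some m => PySem.Set.add s m
      | none => s) s) ↔ m ∈ s ∨ ∃ t ∈ tags, PySem.Dict.get? pvMETA t = some m := by
  induction tags generalizing s with
  | nil => simp [List.foldl]
  | cons hd tl ih =>
    simp only [List.foldl_cons, List.mem_cons]
    cases hget : PySem.Dict.get? pvMETA hd with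
    | none =>
      rw [ih]
      constructor
      · rintro (h | ⟨t, ht, he⟩)
        · exact Or.inl h
        · exact Or.inr ⟨t, Or.inr ht, he⟩
      · rintro (h | ⟨t, ht | ht, he⟩)
        · exact Or.inl h
        · rw [ht, hget] at he; cases he
        · exact Or.inr ⟨t, ht, he⟩
    | some v =>
      rw [ih]
      simp only [PySem.Set.mem_add]
      constructor
      · rintro ((h | h) | ⟨t, ht, he⟩)
        · exact Or.inl h
        · exact Or.inr ⟨hd, Or.inl rfl, by rw [hget, h]⟩
        · exact Or.inr ⟨t, Or.inr ht, he⟩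
      · rintro (h | ⟨t, ht | ht, he⟩)
        · exact Or.inl (Or.inl h)
        · rw [ht, hget] at he
          exact Or.inl (Or.inr (Option.some_inj.mp he).symm)
        · exact Or.inr ⟨t, ht, he⟩

-- the mapping, key-by-key: which tags map to which meta-category
theorem get_pvMETA_eq_business (t : String) :
    PySem.Dict.get? pvMETA t = some "business" ↔ t ∈ (["startups", "marketing", "tech"] : List String) := by
  rw [pvMETA_mk]
  simp only [PySem.Dict.get?_mk_cons, beq_iff_eq]
  split_ifs with h1 h2 h3 h4 h5 h6 h7 h8 h9 <;> subst_eqs <;> simp_all [PySem.Dict.get?]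
  exact ⟨fun h => h1 h.symm, fun h => h2 h.symm, fun h => h3 h.symm⟩

theorem get_pvMETA_eq_selfimp (t : String) :
    PySem.Dict.get? pvMETA t = some "self_improvement" ↔ t ∈ (["productivity", "learning", "mental_models"] : List String) := by
  rw [pvMETA_mk]
  simp only [PySem.Dict.get?_mk_cons, beq_iff_eq]
  split_ifs with h1 h2 h3 h4 h5 h6 h7 h8 h9 <;> subst_eqs <;> simp_all [PySem.Dict.get?]
  exact ⟨fun h => h4 h.symm, fun h => h5 h.symm, fun h => h6 h.symm⟩

theorem get_pvMETA_eq_mindset (t : String) :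
    PySem.Dict.get? pvMETA t = some "mindset" ↔ t ∈ (["philosophy", "psychology", "creativity"] : List String) := by
  rw [pvMETA_mk]
  simp only [PySem.Dict.get?_mk_cons, beq_iff_eq]
  split_ifs with h1 h2 h3 h4 h5 h6 h7 h8 h9 <;> subst_eqs <;> simp_all [PySem.Dict.get?]
  exact ⟨fun h => h7 h.symm, fun h => h8 h.symm, fun h => h9 h.symm⟩

-- ===== VERDICT (by name: the statement is the Claim_ definition above) =====
theorem enhance_tags_spec : Claim_equal_enhance_tags := by
  intro tags _
  unfold Spec_enhance_tags enhance_tags enhance_tags_alt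
  have key : ∀ (m : String) (trig : List String),
      (∀ t, PySem.Dict.get? pvMETA t = some m ↔ t ∈ trig) →
      PySem.Set.contains (tags.foldl (fun s t =>
        match PySem.Dict.get? pvMETA t with
        | some m => PySem.Set.add s m
        | none => s) PySem.Set.empty) m
        = tags.any (fun tag => decide (tag ∈ trig)) := by
    intro m trig hchar
    rw [Bool.eq_iff_iff, PySem.Set.contains_iff, mem_metas_foldl, List.any_eq_true]
    simp only [PySem.Set.empty, List.not_mem_nil, false_or, decide_eq_true_eq, hchar]
  simp only [List.foldl_cons, List.foldl_nil]
  rw [key "business" _ get_pvMETA_eq_business,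
      key "self_improvement" _ get_pvMETA_eq_selfimp,
      key "mindset" _ get_pvMETA_eq_mindset]
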